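-- pv_equiv track=rewrite | github.com/daniilornat/LLM_table_mapping | chain.py | parse
-- ===== SOURCE A (Python) =====
-- def parse(text):
--   apost_count = 0
--   name_saved = False
--
--   func_name = ''
--   code = ''
--
--   for char in text:
--     if char == '(' and not name_saved:
--       func_name = code
--       func_name = func_name.replace('\n', '')
--       func_name = func_name[4:]
--       name_saved = True
--     if char == '`':
--       apost_count += 1
--
--       if apost_count == 6:
--         break
--
--     else:
--       code += char
--
--   return func_name, code
-- ===== SOURCE B (Python) =====
-- def parse(text):
--     parts = text.split('`', 6)
--     segment = '`'.join(parts[:6]) if len(parts) == 7 else text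
--     code = segment.replace('`', '')
--     p = segment.find('(')
--     func_name = '' if p == -1 else segment[:p].replace('`', '').replace('\n', '')[4:]
--     return func_name, code
-- ===== Notes on version B (the rewrite author's own statement) =====
-- stated objective: simpler
-- what changed: Replaces A's fused char-by-char state-machine scan (counter, saved flag, two accumulators) with a cut-then-slice decomposition: split at the 6th backtick once, then compute code and func_name independently from that segment by replace/find/slice.
import Mathlib
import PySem

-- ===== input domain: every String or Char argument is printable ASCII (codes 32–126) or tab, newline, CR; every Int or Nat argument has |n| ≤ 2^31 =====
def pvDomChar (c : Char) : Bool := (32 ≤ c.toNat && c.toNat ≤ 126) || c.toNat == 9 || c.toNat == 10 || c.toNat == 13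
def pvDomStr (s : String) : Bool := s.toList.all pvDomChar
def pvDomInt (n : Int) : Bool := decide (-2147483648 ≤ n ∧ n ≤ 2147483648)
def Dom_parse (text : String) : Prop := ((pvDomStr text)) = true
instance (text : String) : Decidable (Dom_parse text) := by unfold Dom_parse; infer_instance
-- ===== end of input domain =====

-- B replaces A's fused char-by-char scan with a cut-then-slice decomposition (split at the
-- 6th backtick, then compute code and name independently from the segment); objective: simpler.

-- ===== PORT A =====
-- literal transliteration of A's loop: state (apost_count, name_saved, func_name, code);
-- 'break' at the 6th backtick is the non-recursive branch; replace('\n','') is filter,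
-- [4:] on a backtick-free accumulator is List.drop 4 (exact).
def parseLoopA : List Char → Int → Bool → List Char → List Char → List Char × List Char
  | [], _, _, fn, code => (fn, code)
  | c :: rest, ac, saved, fn, code =>
    let fn' := if c == '(' && !saved then ((code.filter (· ≠ '\n')).drop 4) else fn
    let saved' := if c == '(' && !saved then true else saved
    if c = '`' then
      if ac + 1 = 6 then (fn', code)
      else parseLoopA rest (ac + 1) saved' fn' code
    else parseLoopA rest ac saved' fn' (code ++ [c])

def parse (text : String) : String × String :=
  let r := parseLoopA text.toList 0 false [] []
  (String.mk r.1, String.mk r.2)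

-- ===== PORT B =====
-- hand port of str.split('`', maxsplit) (exact: Python's split keeps empty pieces)
def splitT : List Char → Nat → List (List Char)
  | [], _ => [[]]
  | xs, 0 => [xs]
  | c :: rest, k + 1 =>
    if c = '`' then [] :: splitT rest k
    else
      match splitT rest (k + 1) with
      | [] => [[c]]
      | p :: ps => (c :: p) :: ps

-- hand port of '`'.join (exact)
def joinT : List (List Char) → List Char
  | [] => []
  | [x] => x
  | x :: xs => x ++ '`' :: joinT xs

-- hand port of str.find('(') (exact: -1 when absent, else first index)
def findT : List Char → Int
  | [] => -1
  | c :: rest => if c = '(' then 0 else (let r := findT rest; if r = -1 then -1 else r + 1)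

-- literal transliteration of Source B: split/join cut, then code and name from the segment
def parse_alt (text : String) : String × String :=
  let parts := splitT text.toList 6
  let segment := if parts.length = 7 then joinT (parts.take 6) else text.toList
  let code := segment.filter (· ≠ '`')
  let p := findT segment
  let funcName :=
    if p = -1 then []
    else ((((segment.take p.toNat).filter (· ≠ '`')).filter (· ≠ '\n')).drop 4)
  (String.mk funcName, String.mk code)

-- ===== PRECONDITION & SPEC =====
def Spec_parse (text : String) (out : String × String) : Prop := out = parse_alt text
instance (text : String) (out : String × String) : Decidable (Spec_parse text out) := by unfold Spec_parse; infer_instance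

-- ===== CLAIM (what is proved, stated in full; the proofs are below) =====
def Claim_equal_parse : Prop := ∀ (text : String), Dom_parse text → Spec_parse text (parse text)

-- ===== LEMMAS AND PROOFS =====

-- the segment before the m-th backtick (ticks kept)
def segOf : List Char → Nat → List Char
  | [], _ => []
  | c :: rest, m => if c = '`' then (if m = 1 then [] else c :: segOf rest (m - 1)) else c :: segOf rest m

-- A's code accumulator: chars before the m-th backtick, ticks removed
def codeOf : List Char → Nat → List Char
  | [], _ => []
  | c :: rest, m => if c = '`' then (if m = 1 then [] else codeOf rest (m - 1)) else c :: codeOf rest m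

-- A's func_name when not yet saved, with accumulated code acc
def nameOf : List Char → List Char → Nat → List Char
  | _, [], _ => []
  | acc, c :: rest, m =>
    if c = '(' then (acc.filter (· ≠ '\n')).drop 4
    else if c = '`' then (if m = 1 then [] else nameOf acc rest (m - 1))
    else nameOf (acc ++ [c]) rest m

theorem codeOf_eq_filter_segOf (cs : List Char) : ∀ m, codeOf cs m = (segOf cs m).filter (· ≠ '`') := by
  induction cs with
  | nil => intro m; rfl
  | cons c rest ih =>
    intro m
    by_cases hc : c = '`'
    · by_cases hm : m = 1 <;> simp [codeOf, segOf, hc, hm, ih]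
    · simp [codeOf, segOf, hc, ih]

theorem findT_ge (cs : List Char) : findT cs = -1 ∨ 0 ≤ findT cs := by
  induction cs with
  | nil => left; rfl
  | cons c rest ih =>
    by_cases hc : c = '('
    · right; simp [findT, hc]
    · rcases ih with h | h <;> simp [findT, hc, h] <;> omega

theorem nameOf_eq (cs : List Char) : ∀ m acc,
    nameOf acc cs m =
      (if findT (segOf cs m) = -1 then []
       else ((acc ++ ((segOf cs m).take (findT (segOf cs m)).toNat).filter (· ≠ '`')).filter (· ≠ '\n')).drop 4) := by
  induction cs with
  | nil => intro m acc; rfl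
  | cons c rest ih =>
    intro m acc
    by_cases hp : c = '('
    · simp [nameOf, segOf, hp, findT]
    · by_cases hc : c = '`'
      · by_cases hm : m = 1
        · simp [nameOf, segOf, hp, hc, hm, findT]
        · rcases findT_ge (segOf rest (m - 1)) with h | h
          · simp [nameOf, segOf, hp, hc, hm, findT, h, ih]
          · have hne : findT (segOf rest (m - 1)) ≠ -1 := by omega
            have htn : (findT (segOf rest (m - 1)) + 1).toNat = (findT (segOf rest (m - 1))).toNat + 1 := by omega
            simp [nameOf, segOf, hp, hc, hm, findT, hne, ih, htn]
            omega
      · rcases findT_ge (segOf rest m) with h | h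
        · simp [nameOf, segOf, hp, hc, findT, h, ih]
        · have hne : findT (segOf rest m) ≠ -1 := by omega
          have htn : (findT (segOf rest m) + 1).toNat = (findT (segOf rest m)).toNat + 1 := by omega
          simp only [nameOf, segOf, if_neg hp, if_neg hc, ih, findT]
          simp [hne, htn, hp, hc, List.filter_append]
          omega

-- the fused loop computes nameOf/codeOf
theorem parseLoopA_eq (cs : List Char) : ∀ (k : Nat) (saved : Bool) fn code, k < 6 →
    (saved = false → fn = []) →
    parseLoopA cs (k : Int) saved fn code =
      ((if saved then fn else nameOf code cs (6 - k)), code ++ codeOf cs (6 - k)) := by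
  induction cs with
  | nil => intro k saved fn code hk hfn; cases saved <;> simp_all [parseLoopA, nameOf, codeOf]
  | cons c rest ih =>
    intro k saved fn code hk hfn
    by_cases hc : c = '`'
    · subst hc
      by_cases h6 : (k : Int) + 1 = 6
      · have hm : 6 - k = 1 := by omega
        cases saved <;> simp_all [parseLoopA, nameOf, codeOf, hm]
      · have hk' : k + 1 < 6 := by omega
        have hm : 6 - k ≠ 1 := by omega
        have hm2 : 6 - k - 1 = 6 - (k + 1) := by omega
        have hcast : ((k : Int) + 1) = ((k + 1 : Nat) : Int) := by push_cast; ring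
        have hrec := ih (k + 1) saved fn code hk' hfn
        have hstep : parseLoopA ('`' :: rest) (k : Int) saved fn code = parseLoopA rest ((k : Int) + 1) saved fn code := by
          simp [parseLoopA, h6]
        rw [hstep, hcast, hrec]
        cases saved <;> simp [nameOf, codeOf, hm, hm2]
    · by_cases hp : c = '('
      · subst hp
        cases saved with
        | false =>
          have hrec := ih k true ((code.filter (· ≠ '\n')).drop 4) (code ++ ['(']) hk (by simp)
          simp_all [parseLoopA, nameOf, codeOf, hc]
        | true =>
          have hrec := ih k true fn (code ++ ['(']) hk (by simp)
          simp_all [parseLoopA, nameOf, codeOf, hc]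
      · cases saved with
        | false =>
          have hrec := ih k false fn (code ++ [c]) hk hfn
          simp_all [parseLoopA, nameOf, codeOf, hc, hp, hfn rfl]
        | true =>
          have hrec := ih k true fn (code ++ [c]) hk (by simp)
          simp_all [parseLoopA, nameOf, codeOf, hc, hp]

theorem length_splitT (cs : List Char) : ∀ k, (splitT cs k).length = min (cs.count '`') k + 1 := by
  induction cs with
  | nil => intro k; simp [splitT]
  | cons c rest ih =>
    intro k
    cases k with
    | zero => simp [splitT]
    | succ k =>
      by_cases hc : c = '`'
      · simp [splitT, hc, ih, List.count_cons]
      · have h := ih (k + 1)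
        cases hs : splitT rest (k + 1) with
        | nil => simp [hs] at h
        | cons p ps =>
          simp [splitT, hc, hs]
          simp [hs] at h
          simp [List.count_cons, hc, h]

theorem segOf_of_count_lt (cs : List Char) : ∀ m, cs.count '`' < m → segOf cs m = cs := by
  induction cs with
  | nil => intro m _; rfl
  | cons c rest ih =>
    intro m hm
    by_cases hc : c = '`'
    · simp [List.count_cons, hc] at hm
      have hm1 : m ≠ 1 := by omega
      simp [segOf, hc, hm1, ih (m - 1) (by omega)]
    · simp [List.count_cons, hc] at hm
      simp [segOf, hc, ih m hm]

theorem joinT_splitT (cs : List Char) : ∀ k, 1 ≤ k → k ≤ cs.count '`' →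
    joinT ((splitT cs k).take k) = segOf cs k := by
  induction cs with
  | nil => intro k h1 h2; simp at h2; omega
  | cons c rest ih =>
    intro k h1 h2
    by_cases hc : c = '`'
    · cases k with
      | zero => omega
      | succ k =>
        cases k with
        | zero => simp [splitT, hc, joinT, segOf]
        | succ k =>
          simp [List.count_cons, hc] at h2
          have := ih (k + 1) (by omega) (by omega)
          have hlen := length_splitT rest (k + 1)
          cases hs : splitT rest (k + 1) with
          | nil => simp [hs] at hlen
          | cons p ps =>
            simp [splitT, hc, hs, joinT, segOf]
            simp [hs] at this
            cases hps : ps with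
            | nil =>
              simp [hs, hps] at hlen
              omega
            | cons q qs => simp [hps] at this ⊢; simp [joinT, this]
    · cases k with
      | zero => omega
      | succ k =>
        simp [List.count_cons, hc] at h2
        have := ih (k + 1) (by omega) h2
        have hlen := length_splitT rest (k + 1)
        cases hs : splitT rest (k + 1) with
        | nil => simp [hs] at hlen
        | cons p ps =>
          have jcons : ∀ (x : List Char) (l : List (List Char)), joinT ((c :: x) :: l) = c :: joinT (x :: l) := by
            intro x l; cases l <;> simp [joinT]
          simp only [hs, List.take_succ_cons] at this
          simp [splitT, hc, hs, segOf, List.take_succ_cons, jcons, this]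

theorem parse_alt_char (text : String) :
    parse_alt text = (String.mk (nameOf [] text.toList 6), String.mk (codeOf text.toList 6)) := by
  unfold parse_alt
  have hseg : (if (splitT text.toList 6).length = 7 then joinT ((splitT text.toList 6).take 6) else text.toList)
      = segOf text.toList 6 := by
    have hlen := length_splitT text.toList 6
    by_cases h : 6 ≤ text.toList.count '`'
    · have h7 : (splitT text.toList 6).length = 7 := by omega
      simp [h7, joinT_splitT text.toList 6 (by omega) h]
    · have h7 : (splitT text.toList 6).length ≠ 7 := by omega
      simp [h7, segOf_of_count_lt text.toList 6 (by omega)]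
  simp only [hseg]
  rw [nameOf_eq text.toList 6 [], codeOf_eq_filter_segOf]
  rcases findT_ge (segOf text.toList 6) with h | h
  · simp [h]
  · have hne : findT (segOf text.toList 6) ≠ -1 := by omega
    simp [hne]

-- ===== VERDICT (by name: the statement is the Claim_ definition above) =====
theorem parse_spec : Claim_equal_parse := by
  intro text _
  unfold Spec_parse parse
  rw [parse_alt_char]
  have h := parseLoopA_eq text.toList 0 false [] [] (by omega) (by simp)
  simp only [Nat.cast_zero] at h
  simp [h]
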